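-- pv_equiv track=rewrite | github.com/darthrootbeer/house-hunt-hero | test_all_platforms.py | get_category_name
-- ===== SOURCE A (Python) =====
-- def get_category_name(adapter_id):
--     """Categorize adapter by its purpose/type."""
--     categories = {
--         'FSBO Platforms': ['ownerama', 'brokerless', 'flat_fee_group', 'the_rock_foundation',
--                           'fsbo_home_listings', 'diy_flat_fee', 'isold_my_house', 'hoang_realty_fsbo',
--                           'fsbo_com'],
--         'Classifieds & Local News': ['craigslist_owner', 'craigslist_maine', 'craigslist_nh',
--                                      'oodle', 'town_ads', 'sun_journal', 'advertiser_democrat',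
--                                      'midcoast_villager', 'portland_press_herald'],
--         'Social & Community': ['facebook_marketplace', 'facebook_groups', 'nextdoor'],
--         'Bank REO & Foreclosures': ['bank_owned_properties', 'distressed_pro', 'maine_community_bank',
--                                    'fontaine_family'],
--         'Government & Tax Sales': ['on_point_realty', 'york_county_probate', 'municipal_tax_assessor'],
--         'Auctions': ['estatesale', 'gotoauction', 'homes_auction'],
--         'Investment & Wholesale': ['quickflip_construction', 'motivate_maine', 'connected_investors',
--                                   'discounted_property_solutions', 'housecashin', 'offermarket'],
--         'MLS Services': ['maine_listings', 'maine_state_mls'],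
--         'Maine Brokerages': ['listings_direct', 'meservier_associates', 'locations_real_estate_group',
--                            'swan_agency', 'the_maine_agents', 'sargent_real_estate', 'allied_realty',
--                            'landing_real_estate', 'la_count_real_estate', 'realty_of_maine',
--                            'maine_real_estate_co'],
--         'Credit Unions': ['maine_highlands_fcu', 'maine_state_credit_union', 'maine_credit_unions_directory'],
--         'Commercial Real Estate': ['boulos_company', 'necpe', 'malone_commercial', 'loopnet', 'nai_dunham'],
--         'National Aggregators': ['zillow', 'realtor_com', 'redfin', 'trulia', 'homes_com'],
--     }
--
--     for category, adapters in categories.items():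
--         if adapter_id in adapters:
--             return category
--     return 'Other'
-- ===== SOURCE B (Python) =====
-- _CATEGORY_BY_ID = {
--     'ownerama': 'FSBO Platforms',
--     'brokerless': 'FSBO Platforms',
--     'flat_fee_group': 'FSBO Platforms',
--     'the_rock_foundation': 'FSBO Platforms',
--     'fsbo_home_listings': 'FSBO Platforms',
--     'diy_flat_fee': 'FSBO Platforms',
--     'isold_my_house': 'FSBO Platforms',
--     'hoang_realty_fsbo': 'FSBO Platforms',
--     'fsbo_com': 'FSBO Platforms',
--     'craigslist_owner': 'Classifieds & Local News',
--     'craigslist_maine': 'Classifieds & Local News',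
--     'craigslist_nh': 'Classifieds & Local News',
--     'oodle': 'Classifieds & Local News',
--     'town_ads': 'Classifieds & Local News',
--     'sun_journal': 'Classifieds & Local News',
--     'advertiser_democrat': 'Classifieds & Local News',
--     'midcoast_villager': 'Classifieds & Local News',
--     'portland_press_herald': 'Classifieds & Local News',
--     'facebook_marketplace': 'Social & Community',
--     'facebook_groups': 'Social & Community',
--     'nextdoor': 'Social & Community',
--     'bank_owned_properties': 'Bank REO & Foreclosures',
--     'distressed_pro': 'Bank REO & Foreclosures',
--     'maine_community_bank': 'Bank REO & Foreclosures',
--     'fontaine_family': 'Bank REO & Foreclosures',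
--     'on_point_realty': 'Government & Tax Sales',
--     'york_county_probate': 'Government & Tax Sales',
--     'municipal_tax_assessor': 'Government & Tax Sales',
--     'estatesale': 'Auctions',
--     'gotoauction': 'Auctions',
--     'homes_auction': 'Auctions',
--     'quickflip_construction': 'Investment & Wholesale',
--     'motivate_maine': 'Investment & Wholesale',
--     'connected_investors': 'Investment & Wholesale',
--     'discounted_property_solutions': 'Investment & Wholesale',
--     'housecashin': 'Investment & Wholesale',
--     'offermarket': 'Investment & Wholesale',
--     'maine_listings': 'MLS Services',
--     'maine_state_mls': 'MLS Services',
--     'listings_direct': 'Maine Brokerages',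
--     'meservier_associates': 'Maine Brokerages',
--     'locations_real_estate_group': 'Maine Brokerages',
--     'swan_agency': 'Maine Brokerages',
--     'the_maine_agents': 'Maine Brokerages',
--     'sargent_real_estate': 'Maine Brokerages',
--     'allied_realty': 'Maine Brokerages',
--     'landing_real_estate': 'Maine Brokerages',
--     'la_count_real_estate': 'Maine Brokerages',
--     'realty_of_maine': 'Maine Brokerages',
--     'maine_real_estate_co': 'Maine Brokerages',
--     'maine_highlands_fcu': 'Credit Unions',
--     'maine_state_credit_union': 'Credit Unions',
--     'maine_credit_unions_directory': 'Credit Unions',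
--     'boulos_company': 'Commercial Real Estate',
--     'necpe': 'Commercial Real Estate',
--     'malone_commercial': 'Commercial Real Estate',
--     'loopnet': 'Commercial Real Estate',
--     'nai_dunham': 'Commercial Real Estate',
--     'zillow': 'National Aggregators',
--     'realtor_com': 'National Aggregators',
--     'redfin': 'National Aggregators',
--     'trulia': 'National Aggregators',
--     'homes_com': 'National Aggregators',
-- }
--
--
-- def get_category_name(adapter_id):
--     """Categorize adapter by its purpose/type."""
--     return _CATEGORY_BY_ID.get(adapter_id, 'Other')
-- ===== Notes on version B (the rewrite author's own statement) =====
-- stated objective: idiomatic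
-- what changed: Replaced the loop over categories with a list-membership test per category by a single flat id->category dictionary built once (first category wins) and one .get lookup with the same fallback default.
import Mathlib
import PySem

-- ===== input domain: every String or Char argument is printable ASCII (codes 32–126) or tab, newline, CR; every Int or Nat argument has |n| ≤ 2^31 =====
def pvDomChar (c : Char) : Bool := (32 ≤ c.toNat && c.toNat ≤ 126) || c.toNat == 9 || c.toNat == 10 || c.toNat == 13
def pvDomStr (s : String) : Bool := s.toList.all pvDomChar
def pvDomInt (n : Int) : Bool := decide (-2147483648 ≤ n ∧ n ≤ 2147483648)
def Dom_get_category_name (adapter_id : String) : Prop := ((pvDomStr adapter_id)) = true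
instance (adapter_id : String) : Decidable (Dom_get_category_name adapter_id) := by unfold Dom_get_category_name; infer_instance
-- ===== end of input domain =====

-- ===== PORT A =====
-- A: scan the category → adapter-list table in order; return the first category whose list contains the id.
def pvCategories : List (String × List String) := [
  ("FSBO Platforms", ["ownerama", "brokerless", "flat_fee_group", "the_rock_foundation", "fsbo_home_listings", "diy_flat_fee", "isold_my_house", "hoang_realty_fsbo", "fsbo_com"]),
  ("Classifieds & Local News", ["craigslist_owner", "craigslist_maine", "craigslist_nh", "oodle", "town_ads", "sun_journal", "advertiser_democrat", "midcoast_villager", "portland_press_herald"]),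
  ("Social & Community", ["facebook_marketplace", "facebook_groups", "nextdoor"]),
  ("Bank REO & Foreclosures", ["bank_owned_properties", "distressed_pro", "maine_community_bank", "fontaine_family"]),
  ("Government & Tax Sales", ["on_point_realty", "york_county_probate", "municipal_tax_assessor"]),
  ("Auctions", ["estatesale", "gotoauction", "homes_auction"]),
  ("Investment & Wholesale", ["quickflip_construction", "motivate_maine", "connected_investors", "discounted_property_solutions", "housecashin", "offermarket"]),
  ("MLS Services", ["maine_listings", "maine_state_mls"]),
  ("Maine Brokerages", ["listings_direct", "meservier_associates", "locations_real_estate_group", "swan_agency", "the_maine_agents", "sargent_real_estate", "allied_realty", "landing_real_estate", "la_count_real_estate", "realty_of_maine", "maine_real_estate_co"]),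
  ("Credit Unions", ["maine_highlands_fcu", "maine_state_credit_union", "maine_credit_unions_directory"]),
  ("Commercial Real Estate", ["boulos_company", "necpe", "malone_commercial", "loopnet", "nai_dunham"]),
  ("National Aggregators", ["zillow", "realtor_com", "redfin", "trulia", "homes_com"])]

def pvLoopA : List (String × List String) → String → String
  | [], _ => "Other"
  | (category, adapters) :: rest, adapter_id =>
      if adapters.contains adapter_id then category else pvLoopA rest adapter_id

def get_category_name (adapter_id : String) : String :=
  pvLoopA pvCategories adapter_id

-- ===== PORT B =====
-- B: one flat id → category dictionary (one entry per id, first category wins), then a single .get lookup.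
def pvFlatPairs : List (String × String) := [
  ("ownerama", "FSBO Platforms"),
  ("brokerless", "FSBO Platforms"),
  ("flat_fee_group", "FSBO Platforms"),
  ("the_rock_foundation", "FSBO Platforms"),
  ("fsbo_home_listings", "FSBO Platforms"),
  ("diy_flat_fee", "FSBO Platforms"),
  ("isold_my_house", "FSBO Platforms"),
  ("hoang_realty_fsbo", "FSBO Platforms"),
  ("fsbo_com", "FSBO Platforms"),
  ("craigslist_owner", "Classifieds & Local News"),
  ("craigslist_maine", "Classifieds & Local News"),
  ("craigslist_nh", "Classifieds & Local News"),
  ("oodle", "Classifieds & Local News"),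
  ("town_ads", "Classifieds & Local News"),
  ("sun_journal", "Classifieds & Local News"),
  ("advertiser_democrat", "Classifieds & Local News"),
  ("midcoast_villager", "Classifieds & Local News"),
  ("portland_press_herald", "Classifieds & Local News"),
  ("facebook_marketplace", "Social & Community"),
  ("facebook_groups", "Social & Community"),
  ("nextdoor", "Social & Community"),
  ("bank_owned_properties", "Bank REO & Foreclosures"),
  ("distressed_pro", "Bank REO & Foreclosures"),
  ("maine_community_bank", "Bank REO & Foreclosures"),
  ("fontaine_family", "Bank REO & Foreclosures"),
  ("on_point_realty", "Government & Tax Sales"),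
  ("york_county_probate", "Government & Tax Sales"),
  ("municipal_tax_assessor", "Government & Tax Sales"),
  ("estatesale", "Auctions"),
  ("gotoauction", "Auctions"),
  ("homes_auction", "Auctions"),
  ("quickflip_construction", "Investment & Wholesale"),
  ("motivate_maine", "Investment & Wholesale"),
  ("connected_investors", "Investment & Wholesale"),
  ("discounted_property_solutions", "Investment & Wholesale"),
  ("housecashin", "Investment & Wholesale"),
  ("offermarket", "Investment & Wholesale"),
  ("maine_listings", "MLS Services"),
  ("maine_state_mls", "MLS Services"),
  ("listings_direct", "Maine Brokerages"),
  ("meservier_associates", "Maine Brokerages"),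
  ("locations_real_estate_group", "Maine Brokerages"),
  ("swan_agency", "Maine Brokerages"),
  ("the_maine_agents", "Maine Brokerages"),
  ("sargent_real_estate", "Maine Brokerages"),
  ("allied_realty", "Maine Brokerages"),
  ("landing_real_estate", "Maine Brokerages"),
  ("la_count_real_estate", "Maine Brokerages"),
  ("realty_of_maine", "Maine Brokerages"),
  ("maine_real_estate_co", "Maine Brokerages"),
  ("maine_highlands_fcu", "Credit Unions"),
  ("maine_state_credit_union", "Credit Unions"),
  ("maine_credit_unions_directory", "Credit Unions"),
  ("boulos_company", "Commercial Real Estate"),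
  ("necpe", "Commercial Real Estate"),
  ("malone_commercial", "Commercial Real Estate"),
  ("loopnet", "Commercial Real Estate"),
  ("nai_dunham", "Commercial Real Estate"),
  ("zillow", "National Aggregators"),
  ("realtor_com", "National Aggregators"),
  ("redfin", "National Aggregators"),
  ("trulia", "National Aggregators"),
  ("homes_com", "National Aggregators")]

def pvCategoryById : PySem.Dict String String := PySem.Dict.mk pvFlatPairs

def get_category_name_alt (adapter_id : String) : String :=
  pvCategoryById.getD adapter_id "Other"

-- ===== PRECONDITION & SPEC =====
def Spec_get_category_name (adapter_id : String) (out : String) : Prop := out = get_category_name_alt adapter_id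
instance (adapter_id : String) (out : String) : Decidable (Spec_get_category_name adapter_id out) := by unfold Spec_get_category_name; infer_instance

-- ===== CLAIM (what is proved, stated in full; the proofs are below) =====
def Claim_equal_get_category_name : Prop := ∀ (adapter_id : String), Dom_get_category_name adapter_id → Spec_get_category_name adapter_id (get_category_name adapter_id)

-- ===== LEMMAS AND PROOFS =====

-- Looking up in a dict block built from one category's adapter list is the membership test of that list.
theorem pvGet_mk_map_append (ads : List String) (cat : String) (rest : List (String × String)) (aid : String) :
    (PySem.Dict.mk (ads.map (fun a => (a, cat)) ++ rest)).get? aid =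
      if ads.contains aid then some cat else (PySem.Dict.mk rest).get? aid := by
  induction ads with
  | nil => simp
  | cons x xs ih =>
      simp only [List.map_cons, List.cons_append, PySem.Dict.get?_mk_cons, ih, List.contains_cons]
      by_cases h : x = aid
      · subst h; simp
      · have h' : ¬ aid = x := fun e => h e.symm
        simp [h, h']

-- A's ordered scan equals first-match lookup in the flattened id → category list.
theorem pvLoopA_eq (cs : List (String × List String)) (aid : String) :
    pvLoopA cs aid =
      ((PySem.Dict.mk (cs.flatMap (fun p => p.2.map (fun a => (a, p.1))))).get? aid).getD "Other" := by
  induction cs with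
  | nil => simp [pvLoopA, PySem.Dict.get?]
  | cons c rest ih =>
      obtain ⟨cat, ads⟩ := c
      simp only [pvLoopA, List.flatMap_cons, pvGet_mk_map_append, ih]
      split_ifs <;> simp

theorem pvFlat_eq : pvCategories.flatMap (fun p => p.2.map (fun a => (a, p.1))) = pvFlatPairs := by
  rfl

-- ===== VERDICT (by name: the statement is the Claim_ definition above) =====
theorem get_category_name_spec : Claim_equal_get_category_name := by
  intro adapter_id _
  unfold Spec_get_category_name get_category_name get_category_name_alt pvCategoryById
  rw [pvLoopA_eq, pvFlat_eq, PySem.Dict.getD_eq_get?_getD]
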